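-- pv_equiv track=rewrite | github.com/BrunoGrifo/codeAdvent2021 | day14/part1/main.py | dicCount
-- ===== SOURCE A (Python) =====
-- def dicCount(total):
--     occurrences = {}
--     for x in total:
--         if x in occurrences:
--             occurrences[x] += 1
--         if x not in occurrences:
--             occurrences[x] = 1
--     key_max = max(occurrences.values())
--     key_min = min(occurrences.values())
--     return key_max, key_min
-- ===== SOURCE B (Python) =====
-- def dicCount(total):
--     distinct = set(total)
--     counts = [total.count(x) for x in distinct]
--     return max(counts), min(counts)
-- ===== Notes on version B (the rewrite author's own statement) =====
-- stated objective: idiomatic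
-- what changed: Replaces the running dictionary with a pass over the distinct characters, re-counting each with total.count, then taking max/min of that list.
import Mathlib
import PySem

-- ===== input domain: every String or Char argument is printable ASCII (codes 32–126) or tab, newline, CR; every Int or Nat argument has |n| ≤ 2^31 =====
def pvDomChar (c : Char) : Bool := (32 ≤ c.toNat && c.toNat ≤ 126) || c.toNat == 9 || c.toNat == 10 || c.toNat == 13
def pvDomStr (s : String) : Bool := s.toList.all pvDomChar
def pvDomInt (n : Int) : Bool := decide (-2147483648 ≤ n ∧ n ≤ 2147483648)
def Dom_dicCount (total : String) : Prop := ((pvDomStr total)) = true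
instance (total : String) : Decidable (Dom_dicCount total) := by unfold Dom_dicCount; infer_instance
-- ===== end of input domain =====

-- B replaces A's running dictionary with a count over the distinct characters (idiomatic; same return value).

-- ===== PORT A =====
-- A: build a frequency dict in one pass, then max/min of its values.
def dicCount (total : String) : Int × Int :=
  let occurrences : PySem.Dict Char Int :=
    total.toList.foldl (fun d x =>
      let d1 := if d.contains x then d.insert x (d.getD x 0 + 1) else d
      if d1.contains x then d1 else d1.insert x 1) PySem.Dict.empty
  let key_max := (PySem.List.max? occurrences.values (fun v => v)).getD 0  -- .getD 0: max/min raise only when the dict is empty, excluded by Pre_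
  let key_min := (PySem.List.min? occurrences.values (fun v => v)).getD 0
  (key_max, key_min)

-- ===== PORT B =====
-- B: distinct = set(total); counts = [total.count(x) for x in distinct]; return max(counts), min(counts)
def dicCount_alt (total : String) : Int × Int :=
  let distinct : PySem.Set Char := PySem.Set.ofList total.toList
  let counts : List Int := distinct.map (fun x => (total.toList.count x : Int))
  ((PySem.List.max? counts (fun v => v)).getD 0, (PySem.List.min? counts (fun v => v)).getD 0)

-- ===== PRECONDITION & SPEC =====
-- Pre_ excludes only the empty string, on which A (and B) raise ValueError (max of an empty sequence).
def Pre_dicCount (total : String) : Prop := total ≠ ""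
instance (total : String) : Decidable (Pre_dicCount total) := by unfold Pre_dicCount; infer_instance
def pvWitness_dicCount : String := ("ab")
def Spec_dicCount (total : String) (out : Int × Int) : Prop := out = dicCount_alt total
instance (total : String) (out : Int × Int) : Decidable (Spec_dicCount total out) := by unfold Spec_dicCount; infer_instance

-- ===== CLAIM (what is proved, stated in full; the proofs are below) =====
def Claim_equal_dicCount : Prop := ∀ (total : String), Dom_dicCount total → Pre_dicCount total → Spec_dicCount total (dicCount total)

-- ===== LEMMAS AND PROOFS =====

-- A's loop body (two membership tests) is exactly the counter step.
theorem dicCount_step (d : PySem.Dict Char Int) (x : Char) :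
    (let d1 := if d.contains x then d.insert x (d.getD x 0 + 1) else d
     if d1.contains x then d1 else d1.insert x 1) = d.insert x (d.getD x 0 + 1) := by
  by_cases h : d.contains x = true
  · simp [h, PySem.Dict.contains_insert_self]
  · have h0 : d.getD x 0 = 0 := by
      simp only [PySem.Dict.contains, List.any_eq_true, beq_iff_eq, Prod.exists, exists_and_right,
        exists_eq_right, not_exists, PySem.Dict.getD, PySem.Dict.get?] at h ⊢
      rw [List.find?_eq_none.mpr]
      · rfl
      · rintro ⟨a, b⟩ hm hb
        simp at hb; subst hb; exact h b hm
    simp [h, h0]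

theorem dicCount_loop (total : String) :
    total.toList.foldl (fun d x =>
      let d1 := if d.contains x then d.insert x (d.getD x 0 + 1) else d
      if d1.contains x then d1 else d1.insert x 1) PySem.Dict.empty
    = PySem.Dict.counter total.toList := by
  rw [PySem.List.foldl_congr_mem _ _ (fun d x => d.insert x (d.getD x 0 + 1)) _
      (fun acc x _ => dicCount_step acc x)]
  exact PySem.Dict.foldl_insert_getD_add_one_eq_counter total.toList

-- ===== VERDICT (by name: the statement is the Claim_ definition above) =====
theorem dicCount_spec : Claim_equal_dicCount := by
  intro total _ _
  show dicCount total = dicCount_alt total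
  simp only [dicCount, dicCount_alt, dicCount_loop]
  have hv : (PySem.Dict.counter total.toList).values
      = (PySem.Set.ofList total.toList).map (fun x => (total.toList.count x : Int)) := by
    show ((PySem.Dict.counter total.toList).items.map Prod.snd) = _
    rw [PySem.Dict.items_counter]
    simp [List.map_map, Function.comp]
  rw [hv]
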